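-- pv_equiv track=rewrite | github.com/rokkro/tmat | src/exp_csv.py | find_tag
-- ===== SOURCE A (Python) =====
-- list_guide = [  # u=user general, t=tweet general, s=sentiment, em=emotions,eth=ethnicity, ep=eyepos, group tags!!
--     ['u', 'user', 'screen_name'],  # username
--     ['u', 'face', 'detection', 'images', 0, 'faces', 0, 'attributes', 'age'],  # age
--     ['u', 'face', 'emotion', 'frames', 0, 'people', 0, 'demographics', 'age_group'],  # age group
--     ['u', 'face', 'detection', 'images', 0, 'faces', 0, 'attributes', 'glasses'],  # glasses
--     ['u', 'face', 'detection', 'images', 0, 'faces', 0, 'attributes', 'gender', 'type'],  # gender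
--     ['u', 'face', 'detection', 'images', 0, 'faces', 0, 'attributes', 'lips'],  # lips
--     ['u', 'face', 'emotion', 'frames', 0, 'people', 0, 'tracking', 'glances'],  # glances
--     ['u', 'face', 'emotion', 'frames', 0, 'people', 0, 'tracking', 'dwell'],  # dwell
--     ['u', 'face', 'emotion', 'frames', 0, 'people', 0, 'tracking', 'attention'],  # attention
--     ['u', 'face', 'emotion', 'frames', 0, 'people', 0, 'tracking', 'blink'],  # blinking
--     ['u', 'place', 'country'], ['u', 'place', 'name'], ['u', 'user', 'verified'], ['u', 'user', 'followers_count'],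
--     ['u', 'user', 'friends_count'],  # following
--     ['t', 'created_at'], ['t', 'text'], ['t', 'lang'], ['t', 'favorite_count'], ['t', 'retweet_count'],
--     ['s', 'sentiment', 'pos'], ['s', 'sentiment', 'neu'], ['s', 'sentiment', 'neg'], ['s', 'sentiment', 'compound'],
--
--     ['em', 'face', 'emotion', 'frames', 0, 'people', 0, 'emotions', 'anger'],  # anger
--     ['em', 'face', 'emotion', 'frames', 0, 'people', 0, 'emotions', 'disgust'],  # disgust
--     ['em', 'face', 'emotion', 'frames', 0, 'people', 0, 'emotions', 'fear'],  # fear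
--     ['em', 'face', 'emotion', 'frames', 0, 'people', 0, 'emotions', 'joy'],  # joy
--     ['em', 'face', 'emotion', 'frames', 0, 'people', 0, 'emotions', 'sadness'],  # sadness
--     ['em', 'face', 'emotion', 'frames', 0, 'people', 0, 'emotions', 'surprise'],  # surprise
--
--     ['eth', 'face', 'detection', 'images', 0, 'faces', 0, 'attributes', 'asian'],  # asian
--     ['eth', 'face', 'detection', 'images', 0, 'faces', 0, 'attributes', 'hispanic'],  # hispanic
--     ['eth', 'face', 'detection', 'images', 0, 'faces', 0, 'attributes', 'other'],  # other
--     ['eth', 'face', 'detection', 'images', 0, 'faces', 0, 'attributes', 'black'],  # black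
--     ['eth', 'face', 'detection', 'images', 0, 'faces', 0, 'attributes', 'white'],  # white
--     ['ep', 'face', 'detection', 'images', 0, 'faces', 0, 'leftEyeCenterX'],  # leftEyeX
--     ['ep', 'face', 'detection', 'images', 0, 'faces', 0, 'rightEyeCenterX'],  # rightEyeX
--
-- ]
--
-- def find_tag(tag,upper=0,offset=0): #basic tag range
--     r = []
--     for j,i in enumerate(list_guide):
--         if i[0] == tag:
--             if j >=upper:
--                 r.append(j-offset)
--             else:
--                 r.append(j)
--     if len(r) > 0:
--         return r
--     else:
--         return [0,0]
-- ===== SOURCE B (Python) =====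
-- list_guide = [  # same module-level constant as A (only row[0] matters for find_tag)
--     ['u', 'user', 'screen_name'],
--     ['u', 'face', 'detection', 'images', 0, 'faces', 0, 'attributes', 'age'],
--     ['u', 'face', 'emotion', 'frames', 0, 'people', 0, 'demographics', 'age_group'],
--     ['u', 'face', 'detection', 'images', 0, 'faces', 0, 'attributes', 'glasses'],
--     ['u', 'face', 'detection', 'images', 0, 'faces', 0, 'attributes', 'gender', 'type'],
--     ['u', 'face', 'detection', 'images', 0, 'faces', 0, 'attributes', 'lips'],
--     ['u', 'face', 'emotion', 'frames', 0, 'people', 0, 'tracking', 'glances'],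
--     ['u', 'face', 'emotion', 'frames', 0, 'people', 0, 'tracking', 'dwell'],
--     ['u', 'face', 'emotion', 'frames', 0, 'people', 0, 'tracking', 'attention'],
--     ['u', 'face', 'emotion', 'frames', 0, 'people', 0, 'tracking', 'blink'],
--     ['u', 'place', 'country'], ['u', 'place', 'name'], ['u', 'user', 'verified'], ['u', 'user', 'followers_count'],
--     ['u', 'user', 'friends_count'],
--     ['t', 'created_at'], ['t', 'text'], ['t', 'lang'], ['t', 'favorite_count'], ['t', 'retweet_count'],
--     ['s', 'sentiment', 'pos'], ['s', 'sentiment', 'neu'], ['s', 'sentiment', 'neg'], ['s', 'sentiment', 'compound'],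
--     ['em', 'face', 'emotion', 'frames', 0, 'people', 0, 'emotions', 'anger'],
--     ['em', 'face', 'emotion', 'frames', 0, 'people', 0, 'emotions', 'disgust'],
--     ['em', 'face', 'emotion', 'frames', 0, 'people', 0, 'emotions', 'fear'],
--     ['em', 'face', 'emotion', 'frames', 0, 'people', 0, 'emotions', 'joy'],
--     ['em', 'face', 'emotion', 'frames', 0, 'people', 0, 'emotions', 'sadness'],
--     ['em', 'face', 'emotion', 'frames', 0, 'people', 0, 'emotions', 'surprise'],
--     ['eth', 'face', 'detection', 'images', 0, 'faces', 0, 'attributes', 'asian'],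
--     ['eth', 'face', 'detection', 'images', 0, 'faces', 0, 'attributes', 'hispanic'],
--     ['eth', 'face', 'detection', 'images', 0, 'faces', 0, 'attributes', 'other'],
--     ['eth', 'face', 'detection', 'images', 0, 'faces', 0, 'attributes', 'black'],
--     ['eth', 'face', 'detection', 'images', 0, 'faces', 0, 'attributes', 'white'],
--     ['ep', 'face', 'detection', 'images', 0, 'faces', 0, 'leftEyeCenterX'],
--     ['ep', 'face', 'detection', 'images', 0, 'faces', 0, 'rightEyeCenterX'],
-- ]
--
-- # Built ONCE: tag -> list of its positions in list_guide, in order.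
-- tag_index = {}
-- for _j, _row in enumerate(list_guide):
--     tag_index.setdefault(_row[0], []).append(_j)
--
-- def find_tag(tag, upper=0, offset=0):
--     r = [j - offset if j >= upper else j for j in tag_index.get(tag, [])]
--     return r if r else [0, 0]
-- ===== Notes on version B (the rewrite author's own statement) =====
-- stated objective: idiomatic
-- what changed: Replaces the per-call scan over all 37 guide rows (with a tag-match branch inside the loop) by a module-level position index built once (tag -> list of indices), so find_tag is a keyed lookup plus a comprehension over only the matching positions.
import Mathlib
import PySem

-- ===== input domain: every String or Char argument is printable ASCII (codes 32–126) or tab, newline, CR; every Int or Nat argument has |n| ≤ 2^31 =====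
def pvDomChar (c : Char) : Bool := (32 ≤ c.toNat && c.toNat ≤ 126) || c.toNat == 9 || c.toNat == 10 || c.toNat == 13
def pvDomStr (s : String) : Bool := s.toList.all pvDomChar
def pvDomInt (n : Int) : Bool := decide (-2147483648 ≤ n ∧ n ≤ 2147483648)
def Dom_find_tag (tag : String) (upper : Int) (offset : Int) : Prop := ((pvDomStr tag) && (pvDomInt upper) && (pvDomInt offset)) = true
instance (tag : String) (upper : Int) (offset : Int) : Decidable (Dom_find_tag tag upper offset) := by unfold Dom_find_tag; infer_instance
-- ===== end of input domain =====

-- B replaces A's per-call scan over the whole guide list by a one-time tag→positions index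
-- consulted per call (objective: idiomatic; same results).
-- list_guide's rows are heterogeneous lists; find_tag only ever reads row[0], so each row is
-- ported as its first element (its tag).

-- ===== PORT A =====
def list_guide : List String :=
  ["u", "u", "u", "u", "u", "u", "u", "u", "u", "u", "u", "u", "u", "u", "u",
   "t", "t", "t", "t", "t", "s", "s", "s", "s", "em", "em", "em", "em", "em", "em",
   "eth", "eth", "eth", "eth", "eth", "ep", "ep"]

def find_tag (tag : String) (upper : Int) (offset : Int) : List Int :=
  let r := (PySem.List.enumerate list_guide).foldl
    (fun r ji =>
      if ji.2 == tag then
        if ji.1 ≥ upper then r ++ [ji.1 - offset] else r ++ [ji.1]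
      else r) []
  if r.length > 0 then r else [0, 0]

-- ===== PORT B =====
-- tag_index, built once by a single pass over list_guide (port of the module-level loop in Source B)
def tag_index : PySem.Dict String (List Int) :=
  (PySem.List.enumerate list_guide).foldl
    (fun d ji => d.insert ji.2 (d.getD ji.2 [] ++ [ji.1])) PySem.Dict.empty

def find_tag_alt (tag : String) (upper : Int) (offset : Int) : List Int :=
  let r := (tag_index.getD tag []).map (fun j => if j ≥ upper then j - offset else j)
  if r ≠ [] then r else [0, 0]

-- ===== PRECONDITION & SPEC =====
def Spec_find_tag (tag : String) (upper : Int) (offset : Int) (out : List Int) : Prop := out = find_tag_alt tag upper offset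
instance (tag : String) (upper : Int) (offset : Int) (out : List Int) : Decidable (Spec_find_tag tag upper offset out) := by unfold Spec_find_tag; infer_instance

-- ===== CLAIM (what is proved, stated in full; the proofs are below) =====
def Claim_equal_find_tag : Prop := ∀ (tag : String) (upper : Int) (offset : Int), Dom_find_tag tag upper offset → Spec_find_tag tag upper offset (find_tag tag upper offset)

-- ===== LEMMAS AND PROOFS =====

-- factor the shared accumulator out of a two-branch append (the shape of A's loop body)
theorem pv_append_ite (r : List Int) (c : Prop) [Decidable c] (x y : Int) :
    (if c then r ++ [x] else r ++ [y]) = r ++ [if c then x else y] := by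
  split_ifs <;> rfl

-- ===== VERDICT (by name: the statement is the Claim_ definition above) =====
theorem find_tag_spec : Claim_equal_find_tag := by
  intro tag upper offset _
  unfold Spec_find_tag
  by_cases h1 : tag = "u"
  · subst h1; simp [find_tag, find_tag_alt, tag_index, list_guide, PySem.List.enumerate,
      PySem.Dict.getD, PySem.Dict.get?, PySem.Dict.insert, PySem.Dict.empty, pv_append_ite]
  by_cases h2 : tag = "t"
  · subst h2; simp [find_tag, find_tag_alt, tag_index, list_guide, PySem.List.enumerate,
      PySem.Dict.getD, PySem.Dict.get?, PySem.Dict.insert, PySem.Dict.empty, pv_append_ite]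
  by_cases h3 : tag = "s"
  · subst h3; simp [find_tag, find_tag_alt, tag_index, list_guide, PySem.List.enumerate,
      PySem.Dict.getD, PySem.Dict.get?, PySem.Dict.insert, PySem.Dict.empty, pv_append_ite]
  by_cases h4 : tag = "em"
  · subst h4; simp [find_tag, find_tag_alt, tag_index, list_guide, PySem.List.enumerate,
      PySem.Dict.getD, PySem.Dict.get?, PySem.Dict.insert, PySem.Dict.empty, pv_append_ite]
  by_cases h5 : tag = "eth"
  · subst h5; simp [find_tag, find_tag_alt, tag_index, list_guide, PySem.List.enumerate,
      PySem.Dict.getD, PySem.Dict.get?, PySem.Dict.insert, PySem.Dict.empty, pv_append_ite]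
  by_cases h6 : tag = "ep"
  · subst h6; simp [find_tag, find_tag_alt, tag_index, list_guide, PySem.List.enumerate,
      PySem.Dict.getD, PySem.Dict.get?, PySem.Dict.insert, PySem.Dict.empty, pv_append_ite]
  · simp [find_tag, find_tag_alt, tag_index, list_guide, PySem.List.enumerate,
      PySem.Dict.getD, PySem.Dict.get?, PySem.Dict.insert, PySem.Dict.empty,
      Ne.symm h1, Ne.symm h2, Ne.symm h3, Ne.symm h4, Ne.symm h5, Ne.symm h6]
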